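-- pv_equiv track=rewrite | github.com/jad2192/advent_of_code_2022 | solutions/day8.py | generate_view_distances
-- ===== SOURCE A (Python) =====
-- from collections import defaultdict
-- from typing import DefaultDict, Dict, List, Set, Tuple
--
-- def generate_view_distances(tree_line: str) -> Tuple[DefaultDict, DefaultDict]:
--     L = len(tree_line)
--     vd_forward: DefaultDict[int, int] = defaultdict(lambda: 0)
--     vd_backward: DefaultDict[int, int] = defaultdict(lambda: 0)
--     for k in range(1, L - 1):
--         backs = [j for j, h in enumerate(tree_line[:k]) if h >= tree_line[k]]
--         forwards = [k + j + 1 for j, h in enumerate(tree_line[k + 1 :]) if h >= tree_line[k]]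
--         vd_backward[k] = k if not backs else k - backs[-1]
--         vd_forward[k] = L - 1 - k if not forwards else forwards[0] - k
--     return vd_backward, vd_forward
-- ===== SOURCE B (Python) =====
-- def generate_view_distances(tree_line):
--     L = len(tree_line)
--     vd_backward = {}
--     vd_forward = {}
--     for k in range(1, L - 1):
--         c = tree_line[k]
--         j = k - 1
--         while j > 0 and tree_line[j] < c:
--             j -= 1
--         vd_backward[k] = k - j
--         i = k + 1
--         while i < L - 1 and tree_line[i] < c:
--             i += 1
--         vd_forward[k] = i - k
--     return vd_backward, vd_forward
-- ===== Notes on version B (the rewrite author's own statement) =====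
-- stated objective: faster
-- what changed: A builds, for every position k, full lists of all qualifying indices from enumerate over string slices and then takes the last/first; B does two early-exit scans (while-loops) outward from k that stop at the nearest tree of height >= the current one, building no slices or lists.
import Mathlib
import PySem

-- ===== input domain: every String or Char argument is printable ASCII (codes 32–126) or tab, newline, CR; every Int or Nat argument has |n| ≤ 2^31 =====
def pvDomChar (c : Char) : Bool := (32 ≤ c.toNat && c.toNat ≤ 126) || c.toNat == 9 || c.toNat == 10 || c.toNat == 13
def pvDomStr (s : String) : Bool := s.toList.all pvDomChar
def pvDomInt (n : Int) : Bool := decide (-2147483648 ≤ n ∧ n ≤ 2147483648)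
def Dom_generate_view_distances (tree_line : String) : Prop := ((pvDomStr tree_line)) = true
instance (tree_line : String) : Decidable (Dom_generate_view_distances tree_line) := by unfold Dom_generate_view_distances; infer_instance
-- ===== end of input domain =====

-- B replaces A's per-position full-line comprehensions (and slicing) by two early-exit
-- scans to the nearest tree of height ≥ the current one; same return value (alternative/constant-factor).

-- ===== PORT A =====
-- Literal transliteration of A: for each k, build the full lists `backs`/`forwards`
-- from enumerate over slices, then take backs[-1] / forwards[0].
def generate_view_distances (tree_line : String) : (List (Int × Int)) × (List (Int × Int)) :=
  let cs := tree_line.toList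
  let L : Int := cs.length
  let r := (PySem.List.pyRange 1 (L - 1) 1).foldl
    (fun (st : PySem.Dict Int Int × PySem.Dict Int Int) k =>
      let hk := PySem.List.pyGetD cs k ' '   -- tree_line[k]; k is in range for every k in range(1, L-1)
      let backs := (((PySem.List.enumerate (PySem.List.slice cs none (some k)) 0).filter
          (fun p => hk ≤ p.2)).map (fun p => p.1))
      let forwards := (((PySem.List.enumerate (PySem.List.slice cs (some (k + 1)) none) 0).filter
          (fun p => hk ≤ p.2)).map (fun p => k + p.1 + 1))
      let vb := st.1.insert k (if backs = [] then k else k - PySem.List.pyGetD backs (-1) 0)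
      let vf := st.2.insert k (if forwards = [] then L - 1 - k else PySem.List.pyGetD forwards 0 0 - k)
      (vb, vf))
    (PySem.Dict.empty, PySem.Dict.empty)
  (r.1.items, r.2.items)

-- ===== PORT B =====
-- B's backward while-loop: j := k-1; while j > 0 and cs[j] < c: j -= 1; returns j.
-- (indices are always in range here, so List.getD is exact for the Python indexing)
def pvScanB (cs : List Char) (c : Char) : Nat → Nat
  | 0 => 0
  | j + 1 => if cs.getD (j + 1) ' ' < c then pvScanB cs c j else j + 1

-- B's forward while-loop: i := k+1; while i < L-1 and cs[i] < c: i += 1; returns i.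
-- `fuel` is (L-1) - i, so the loop guard i < L-1 is exactly fuel ≠ 0.
def pvScanF (cs : List Char) (c : Char) (i : Nat) : Nat → Nat
  | 0 => i
  | f + 1 => if cs.getD i ' ' < c then pvScanF cs c (i + 1) f else i

def generate_view_distances_alt (tree_line : String) : (List (Int × Int)) × (List (Int × Int)) :=
  let cs := tree_line.toList
  let L : Nat := cs.length
  let r := (PySem.List.pyRange 1 ((L : Int) - 1) 1).foldl
    (fun (st : PySem.Dict Int Int × PySem.Dict Int Int) k =>
      let n := k.toNat
      let c := cs.getD n ' '
      let j := pvScanB cs c (n - 1)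
      let i := pvScanF cs c (n + 1) (L - 1 - (n + 1))
      (st.1.insert k (k - (j : Int)), st.2.insert k ((i : Int) - k)))
    (PySem.Dict.empty, PySem.Dict.empty)
  (r.1.items, r.2.items)

-- ===== PRECONDITION & SPEC =====
def Spec_generate_view_distances (tree_line : String) (out : (List (Int × Int)) × (List (Int × Int))) : Prop := out = generate_view_distances_alt tree_line
instance (tree_line : String) (out : (List (Int × Int)) × (List (Int × Int))) : Decidable (Spec_generate_view_distances tree_line out) := by unfold Spec_generate_view_distances; infer_instance

-- ===== CLAIM (what is proved, stated in full; the proofs are below) =====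
def Claim_equal_generate_view_distances : Prop := ∀ (tree_line : String), Dom_generate_view_distances tree_line → Spec_generate_view_distances tree_line (generate_view_distances tree_line)

-- ===== LEMMAS AND PROOFS =====

-- first index of the suffix l whose char is ≥ c (proof-side description of the forward scan)
def pvFF (c : Char) : List Char → Option Nat
  | [] => none
  | x :: xs => if c ≤ x then some 0 else (pvFF c xs).map (· + 1)

-- head of A's `forwards` local-index list, described by pvFF
theorem pvFwd_head (c : Char) (l : List Char) (s : Int) :
    (((PySem.List.enumerate l s).filter (fun p => c ≤ p.2)).map (fun p => p.1)).head?
      = (pvFF c l).map (fun j => s + (j : Int)) := by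
  induction l generalizing s with
  | nil => simp [pvFF, PySem.List.enumerate_nil]
  | cons x xs ih =>
    rw [PySem.List.enumerate_cons]
    by_cases h : c ≤ x
    · simp [pvFF, h]
    · simp only [pvFF, h, if_neg, List.filter_cons, decide_eq_true_eq]
      simp only [h, if_false, ite_false]
      rw [ih (s + 1)]
      cases pvFF c xs <;> simp <;> omega

-- B's forward scan, described by pvFF over the suffix
theorem pvScanF_spec (cs : List Char) (c : Char) :
    ∀ (f i : Nat), i + f + 1 = cs.length →
      pvScanF cs c i f = i + (pvFF c (cs.drop i)).getD f := by
  intro f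
  induction f with
  | zero =>
    intro i h
    have hi : i < cs.length := by omega
    have hdrop : cs.drop i = [cs[i]] := by
      have := List.drop_eq_getElem_cons hi
      rw [this]
      have : cs.drop (i + 1) = [] := by simp; omega
      rw [this]
    simp [pvScanF, hdrop, pvFF]
    by_cases h2 : c ≤ cs[i] <;> simp [h2]
  | succ f ih =>
    intro i h
    have hi : i < cs.length := by omega
    have hdrop : cs.drop i = cs[i] :: cs.drop (i + 1) := List.drop_eq_getElem_cons hi
    have hget : cs.getD i ' ' = cs[i] := List.getD_eq_getElem cs ' ' hi
    rw [pvScanF, hget, hdrop]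
    by_cases h2 : c ≤ cs[i]
    · have : ¬ cs[i] < c := not_lt.mpr h2
      simp [this, pvFF, h2]
    · have hlt : cs[i] < c := lt_of_not_ge h2
      simp only [hlt, if_true, pvFF, h2, ite_false]
      rw [ih (i + 1) (by omega)]
      cases pvFF c (cs.drop (i + 1)) <;> simp <;> omega

-- A's `backs` list for prefix length t, as appearing in port A
def pvBacks (cs : List Char) (c : Char) (t : Nat) : List Int :=
  ((PySem.List.enumerate (cs.take t) 0).filter (fun p => c ≤ p.2)).map (fun p => p.1)

-- B's backward scan computes the last element of A's `backs` (0 when there is none)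
theorem pvScanB_spec (cs : List Char) (c : Char) :
    ∀ (j : Nat), j + 1 ≤ cs.length →
      (pvScanB cs c j : Int) = (pvBacks cs c (j + 1)).getLast?.getD 0 := by
  intro j
  induction j with
  | zero =>
    intro h
    have h0 : 0 < cs.length := by omega
    have htake : cs.take 1 = [cs[0]] := by
      rw [List.take_one]
      simp [List.head?_eq_getElem?, List.getElem?_eq_getElem h0]
    simp [pvScanB, pvBacks, htake, PySem.List.enumerate_cons, PySem.List.enumerate_nil]
    by_cases h2 : c ≤ cs[0] <;> simp [h2]
  | succ j ih =>
    intro h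
    have hj : j + 1 < cs.length := by omega
    have htake : cs.take (j + 2) = cs.take (j + 1) ++ [cs[j + 1]] := by
      rw [List.take_succ]
      simp [List.getElem?_eq_getElem hj]
    have hget : cs.getD (j + 1) ' ' = cs[j + 1] := List.getD_eq_getElem cs ' ' hj
    have hlen : (cs.take (j + 1)).length = j + 1 := by simp; omega
    rw [pvScanB, hget]
    have hb : pvBacks cs c (j + 2)
        = pvBacks cs c (j + 1) ++ (if c ≤ cs[j + 1] then [((j + 1 : Nat) : Int)] else []) := by
      unfold pvBacks
      rw [htake, PySem.List.enumerate_append, List.filter_append, List.map_append, hlen]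
      congr 1
      by_cases h2 : c ≤ cs[j + 1] <;>
        simp [PySem.List.enumerate_cons, PySem.List.enumerate_nil, h2]
    rw [hb]
    by_cases h2 : c ≤ cs[j + 1]
    · have : ¬ cs[j + 1] < c := not_lt.mpr h2
      simp [this, h2]
    · have hlt : cs[j + 1] < c := lt_of_not_ge h2
      simp only [hlt, if_true, h2, ite_false, List.append_nil]
      exact ih (by omega)

-- the per-iteration step functions agree for every k in range(1, L-1)
theorem pvStep_eq (cs : List Char) (k : Int) (h1 : 1 ≤ k) (h2 : k < (cs.length : Int) - 1)
    (st : PySem.Dict Int Int × PySem.Dict Int Int) :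
    (let hk := PySem.List.pyGetD cs k ' '
     let backs := (((PySem.List.enumerate (PySem.List.slice cs none (some k)) 0).filter
         (fun p => hk ≤ p.2)).map (fun p => p.1))
     let forwards := (((PySem.List.enumerate (PySem.List.slice cs (some (k + 1)) none) 0).filter
         (fun p => hk ≤ p.2)).map (fun p => k + p.1 + 1))
     let vb := st.1.insert k (if backs = [] then k else k - PySem.List.pyGetD backs (-1) 0)
     let vf := st.2.insert k (if forwards = [] then (cs.length : Int) - 1 - k
         else PySem.List.pyGetD forwards 0 0 - k)
     ((vb, vf) : PySem.Dict Int Int × PySem.Dict Int Int))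
    = (let n := k.toNat
       let c := cs.getD n ' '
       let j := pvScanB cs c (n - 1)
       let i := pvScanF cs c (n + 1) (cs.length - 1 - (n + 1))
       (st.1.insert k (k - (j : Int)), st.2.insert k ((i : Int) - k))) := by
  obtain ⟨n, rfl⟩ : ∃ n : Nat, k = (n : Int) := ⟨k.toNat, (Int.toNat_of_nonneg (by omega)).symm⟩
  have hn1 : 1 ≤ n := by omega
  have hn2 : n + 2 ≤ cs.length := by omega
  simp only [Int.toNat_natCast]
  have hc : PySem.List.pyGetD cs (n : Int) ' ' = cs.getD n ' ' := PySem.List.pyGetD_natCast cs n ' '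
  have hcg : cs.getD n ' ' = cs[n] := List.getD_eq_getElem cs ' ' (by omega)
  set c := cs.getD n ' ' with hcdef
  -- backward value
  have hslb : PySem.List.slice cs none (some (n : Int)) = cs.take n :=
    PySem.List.slice_to_natCast cs n
  have hBacks : (((PySem.List.enumerate (PySem.List.slice cs none (some (n : Int))) 0).filter
      (fun p => c ≤ p.2)).map (fun p => p.1)) = pvBacks cs c n := by
    rw [hslb]; rfl
  have hB := pvScanB_spec cs c (n - 1) (by omega)
  have hn1' : n - 1 + 1 = n := by omega
  rw [hn1'] at hB
  have hbackEq : (if pvBacks cs c n = [] then ((n : Nat) : Int)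
      else (n : Int) - PySem.List.pyGetD (pvBacks cs c n) (-1) 0)
      = (n : Int) - (pvScanB cs c (n - 1) : Int) := by
    rw [hB]
    by_cases hemp : pvBacks cs c n = []
    · simp [hemp]
    · rw [if_neg hemp, PySem.List.pyGetD_neg_one (pvBacks cs c n) 0 hemp,
        List.getLast?_eq_some_getLast hemp]
      simp
  -- forward value
  have hslf : PySem.List.slice cs (some ((n : Int) + 1)) none = cs.drop (n + 1) := by
    have : ((n : Int) + 1) = ((n + 1 : Nat) : Int) := by push_cast; ring
    rw [this]; exact PySem.List.slice_from_natCast cs (n + 1)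
  have hF := pvScanF_spec cs c (cs.length - 1 - (n + 1)) (n + 1) (by omega)
  have hfhead := pvFwd_head c (cs.drop (n + 1)) 0
  have hfwdEq : (if (((PySem.List.enumerate (PySem.List.slice cs (some ((n : Int) + 1)) none) 0).filter
        (fun p => c ≤ p.2)).map (fun p => (n : Int) + p.1 + 1)) = []
      then (cs.length : Int) - 1 - (n : Int)
      else PySem.List.pyGetD (((PySem.List.enumerate (PySem.List.slice cs (some ((n : Int) + 1)) none) 0).filter
        (fun p => c ≤ p.2)).map (fun p => (n : Int) + p.1 + 1)) 0 0 - (n : Int))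
      = (pvScanF cs c (n + 1) (cs.length - 1 - (n + 1)) : Int) - (n : Int) := by
    rw [hslf, hF]
    cases hff : pvFF c (cs.drop (n + 1)) with
    | none =>
      have hnil : (((PySem.List.enumerate (cs.drop (n + 1)) 0).filter
          (fun p => c ≤ p.2)).map (fun p => p.1)) = [] := by
        have := hfhead; rw [hff] at this
        simpa [List.head?_eq_none_iff] using this
      have hnil2 : (((PySem.List.enumerate (cs.drop (n + 1)) 0).filter
          (fun p => c ≤ p.2)).map (fun p => (n : Int) + p.1 + 1)) = [] := by
        have : ((PySem.List.enumerate (cs.drop (n + 1)) 0).filter (fun p => c ≤ p.2)) = [] := by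
          simpa using hnil
        rw [this]; rfl
      rw [if_pos hnil2]
      simp only [Option.getD_none]
      have hL : n + 1 + (cs.length - 1 - (n + 1)) = cs.length - 1 := by omega
      rw [hL]
      omega
    | some j =>
      have hj : j + 1 ≤ cs.length - (n + 1) := by
        -- pvFF's index is within the suffix
        have hlen2 : ∀ (l : List Char) (m : Nat), pvFF c l = some m → m < l.length := by
          intro l
          induction l with
          | nil => intro m hm; simp [pvFF] at hm
          | cons x xs ihx =>
            intro m hm
            by_cases hx : c ≤ x
            · simp [pvFF, hx] at hm; simp; omega
            · simp [pvFF, hx] at hm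
              obtain ⟨m', hm', rfl⟩ := hm
              have := ihx m' hm'
              simp; omega
        have := hlen2 _ _ hff
        simp at this; omega
      have hhd : (((PySem.List.enumerate (cs.drop (n + 1)) 0).filter
          (fun p => c ≤ p.2)).map (fun p => (n : Int) + p.1 + 1)).head?
          = some ((n : Int) + (j : Int) + 1) := by
        have h1' : (((PySem.List.enumerate (cs.drop (n + 1)) 0).filter
            (fun p => c ≤ p.2)).map (fun p => (n : Int) + p.1 + 1)).head?
            = ((((PySem.List.enumerate (cs.drop (n + 1)) 0).filter
              (fun p => c ≤ p.2)).map (fun p => p.1)).head?).map (fun x => (n : Int) + x + 1) := by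
          simp only [List.head?_map, Option.map_map]
          rfl
        rw [h1', hfhead, hff]
        simp
      cases hl : (((PySem.List.enumerate (cs.drop (n + 1)) 0).filter
          (fun p => c ≤ p.2)).map (fun p => (n : Int) + p.1 + 1)) with
      | nil => rw [hl] at hhd; simp at hhd
      | cons y ys =>
        rw [hl] at hhd
        simp at hhd
        rw [if_neg (by simp)]
        have : PySem.List.pyGetD (y :: ys) 0 0 = y := PySem.List.pyGetD_zero_cons y ys 0
        rw [this, hhd]
        simp only [Option.getD_some]
        push_cast
        omega
  simp only [hc]
  rw [hBacks, hbackEq, hfwdEq]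

-- ===== VERDICT (by name: the statement is the Claim_ definition above) =====
theorem generate_view_distances_spec : Claim_equal_generate_view_distances := by
  intro tree_line _
  unfold Spec_generate_view_distances generate_view_distances generate_view_distances_alt
  simp only []
  congr 2 <;>
  · apply congrArg
    apply PySem.List.foldl_congr_mem
    intro st k hk
    have hmem := (PySem.List.mem_pyRange_one).mp hk
    exact pvStep_eq tree_line.toList k hmem.1 hmem.2 st
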